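-- pv_equiv track=rewrite | github.com/TFeld00/AdventOfCode | 2022/alg/util.py | parse_with_headers
-- ===== SOURCE A (Python) =====
-- def parse_with_headers(F):
--     d = {}
--     n = ''
--     r = []
--     for l in F:
--         if not l:
--             d[n] = r
--             n = ''
--             r = []
--         elif l and not n:
--             n = l
--         elif n:
--             r += [l]
--     if r:
--         d[n] = r
--     return d
-- ===== SOURCE B (Python) =====
-- def parse_with_headers(F):
--     # Phase 1: split F into blank-closed groups plus a trailing open group.
--     groups = []
--     cur = []
--     for l in F:
--         if l:
--             cur.append(l)
--         else:
--             groups.append(cur)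
--             cur = []
--     # Phase 2: each closed group contributes header -> body; the trailing
--     # open group only counts when it has at least one body line.
--     d = {}
--     for g in groups:
--         d[g[0] if g else ''] = g[1:]
--     if len(cur) > 1:
--         d[cur[0]] = cur[1:]
--     return d
-- ===== Notes on version B (the rewrite author's own statement) =====
-- stated objective: alternative
-- what changed: Replaces A's flat single pass over a (dict, current-header, current-body) running state by a two-phase shape: first split the lines into blank-closed groups (plus a trailing open group), then build the dict from the groups, with the trailing group kept only when it has a body.
import Mathlib
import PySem

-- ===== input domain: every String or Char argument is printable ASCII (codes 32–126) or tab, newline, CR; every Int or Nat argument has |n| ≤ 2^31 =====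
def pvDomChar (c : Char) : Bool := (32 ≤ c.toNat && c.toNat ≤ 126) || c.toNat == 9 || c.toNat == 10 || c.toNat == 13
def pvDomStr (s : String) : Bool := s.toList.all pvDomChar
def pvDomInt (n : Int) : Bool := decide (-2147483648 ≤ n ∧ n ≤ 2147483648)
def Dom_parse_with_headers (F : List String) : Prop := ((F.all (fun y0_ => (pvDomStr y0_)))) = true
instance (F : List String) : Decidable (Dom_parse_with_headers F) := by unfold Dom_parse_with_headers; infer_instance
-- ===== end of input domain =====

-- B replaces A's flat single pass with running (dict, header, body) state by a
-- two-phase shape: split into blank-closed groups, then build the dict from the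
-- groups (alternative decomposition, same cost).


-- ===== PORT A =====
-- A's loop body: blank line closes the group, a line with no current header
-- starts one, otherwise the line extends the body.
def pvStepA (s : PySem.Dict String (List String) × String × List String) (l : String) :
    PySem.Dict String (List String) × String × List String :=
  if l = "" then (s.1.insert s.2.1 s.2.2, "", ([] : List String))
  else if s.2.1 = "" then (s.1, l, s.2.2)
  else (s.1, s.2.1, s.2.2 ++ [l])

def parse_with_headers (F : List String) : List (String × List String) :=
  let s := F.foldl pvStepA (PySem.Dict.empty, "", [])
  (if s.2.2 ≠ [] then s.1.insert s.2.1 s.2.2 else s.1).items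

-- ===== PORT B =====
-- B phase 1 step: nonblank lines extend the open group, a blank closes it.
def pvStepB (s : List (List String) × List String) (l : String) :
    List (List String) × List String :=
  if l ≠ "" then (s.1, s.2 ++ [l]) else (s.1 ++ [s.2], [])

-- B phase 2 step: record group[0] (or '' for an empty group) -> group[1:].
def pvIns (d : PySem.Dict String (List String)) (g : List String) :
    PySem.Dict String (List String) :=
  d.insert (g.headD "") g.tail

def parse_with_headers_alt (F : List String) : List (String × List String) :=
  let p := F.foldl pvStepB ([], [])
  let d := p.1.foldl pvIns PySem.Dict.empty
  (if p.2.length > 1 then d.insert (p.2.headD "") p.2.tail else d).items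

-- ===== PRECONDITION & SPEC =====
def Spec_parse_with_headers (F : List String) (out : List (String × List String)) : Prop := out = parse_with_headers_alt F
instance (F : List String) (out : List (String × List String)) : Decidable (Spec_parse_with_headers F out) := by unfold Spec_parse_with_headers; infer_instance

-- ===== CLAIM (what is proved, stated in full; the proofs are below) =====
def Claim_equal_parse_with_headers : Prop := ∀ (F : List String), Dom_parse_with_headers F → Spec_parse_with_headers F (parse_with_headers F)

-- ===== LEMMAS AND PROOFS =====

-- main invariant lemma: A's loop+finish, started on the state corresponding to
-- the already-closed groups gs and the open group cur, equals B's
-- split-then-build result from (gs, cur).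
theorem pv_main (F : List String) :
    ∀ (d : PySem.Dict String (List String)) (gs : List (List String)) (cur : List String),
      (cur.headD "" = "" → cur = []) →
      (let s := F.foldl pvStepA (gs.foldl pvIns d, cur.headD "", cur.tail)
       (if s.2.2 ≠ [] then s.1.insert s.2.1 s.2.2 else s.1).items) =
      (let p := F.foldl pvStepB (gs, cur)
       let d' := p.1.foldl pvIns d
       (if p.2.length > 1 then d'.insert (p.2.headD "") p.2.tail else d').items) := by
  induction F with
  | nil =>
    intro d gs cur h
    simp only [List.foldl_nil]
    cases cur with
    | nil => simp
    | cons a t => cases t <;> simp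

  | cons l F ih =>
    intro d gs cur h
    simp only [List.foldl_cons]
    by_cases hl : l = ""
    · -- blank line: close the current group
      have e1 : pvStepA (gs.foldl pvIns d, cur.headD "", cur.tail) l =
          ((gs ++ [cur]).foldl pvIns d, "", ([] : List String)) := by
        simp [pvStepA, pvIns, hl, List.foldl_append]
      have e2 : pvStepB (gs, cur) l = (gs ++ [cur], []) := by
        simp [pvStepB, hl]
      rw [e1, e2]
      simpa using ih d (gs ++ [cur]) [] (fun _ => rfl)
    · by_cases hn : cur.headD "" = ""
      · -- no open header: the line starts a new group
        have hc : cur = [] := h hn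
        subst hc
        have e1 : pvStepA (gs.foldl pvIns d, List.headD [] "", List.tail []) l =
            (gs.foldl pvIns d, l, ([] : List String)) := by
          simp [pvStepA, hl]
        have e2 : pvStepB (gs, []) l = (gs, [l]) := by
          simp [pvStepB, hl]
        rw [e1, e2]
        simpa using ih d gs [l] (fun hh => absurd hh hl)
      · -- open header present: the line extends the body
        have hc : cur ≠ [] := by intro hh; subst hh; exact hn rfl
        have h1 : (cur ++ [l]).headD "" = cur.headD "" := by
          cases cur with | nil => exact absurd rfl hc | cons a t => rfl
        have h2 : (cur ++ [l]).tail = cur.tail ++ [l] := by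
          cases cur with | nil => exact absurd rfl hc | cons a t => rfl
        have e1 : pvStepA (gs.foldl pvIns d, cur.headD "", cur.tail) l =
            (gs.foldl pvIns d, (cur ++ [l]).headD "", (cur ++ [l]).tail) := by
          rw [h1, h2]; simp only [pvStepA]; rw [if_neg hl, if_neg hn]
        have e2 : pvStepB (gs, cur) l = (gs, cur ++ [l]) := by
          simp [pvStepB, hl]
        rw [e1, e2]
        exact ih d gs (cur ++ [l]) (by rw [h1]; intro hh; exact absurd hh hn)

-- ===== VERDICT (by name: the statement is the Claim_ definition above) =====
theorem parse_with_headers_spec : Claim_equal_parse_with_headers := by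
  intro F _
  unfold Spec_parse_with_headers parse_with_headers parse_with_headers_alt
  simpa using pv_main F PySem.Dict.empty [] [] (fun _ => rfl)
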